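-- pv_equiv track=rewrite | github.com/landseal/starbattle-solver | starbattle.py | backtonotstar
-- ===== SOURCE A (Python) =====
-- def backtonotstar(starmap):
--     starmapsize = len(starmap)
--     starmaprange = range(starmapsize)
--     added = False
--     prevrow = 0
--     prevcol = 0
--     for row in starmaprange:
--         for col in starmaprange:
--             if starmap[row][col] == ' ':
--                 if not added:
--                     starmap[prevrow][prevcol] = '-'
--                     added = True
--             else:
--                 prevrow = row
--                 prevcol = col
--     return starmap
-- ===== SOURCE B (Python) =====
-- def backtonotstar(starmap):
--     n = len(starmap)
--     first = next(((r, c) for r in range(n) for c in range(n)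
--                   if starmap[r][c] == ' '), None)
--     if first is None:
--         return starmap
--     k = first[0] * n + first[1]
--     j = k - 1 if k > 0 else 0
--     starmap[j // n][j % n] = '-'
--     return starmap
-- ===== Notes on version B (the rewrite author's own statement) =====
-- stated objective: alternative
-- what changed: Replaces the single forward pass threading an added-flag and a running prev-cell pointer by a find-first-blank phase (row-major generator) followed by index arithmetic that marks the cell at linear position max(k-1,0).
import Mathlib
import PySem

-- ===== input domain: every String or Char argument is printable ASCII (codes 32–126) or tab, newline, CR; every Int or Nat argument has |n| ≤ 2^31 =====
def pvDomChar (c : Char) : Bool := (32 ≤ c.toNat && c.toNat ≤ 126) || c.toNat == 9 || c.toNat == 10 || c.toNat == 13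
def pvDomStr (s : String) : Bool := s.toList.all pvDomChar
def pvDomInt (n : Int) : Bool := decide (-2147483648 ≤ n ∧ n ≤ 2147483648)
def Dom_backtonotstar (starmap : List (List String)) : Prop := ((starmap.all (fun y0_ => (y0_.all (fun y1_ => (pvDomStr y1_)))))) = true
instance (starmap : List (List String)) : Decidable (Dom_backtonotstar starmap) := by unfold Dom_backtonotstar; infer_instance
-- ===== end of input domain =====

-- B replaces A's single forward pass threading an added-flag and a running prev pointer by a
-- find-first-blank phase followed by index arithmetic (mark linear cell max(k-1,0)); equivalence
-- is about the RETURN value (both Pythons mutate starmap in place, writing the same single cell).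

-- ===== PORT A =====
-- starmap[r][c] read: in range under Pre_ (Python raises IndexError out of range), so getD is exact there
def getCell (g : List (List String)) (r c : Nat) : String := (g.getD r []).getD c ""
-- starmap[r][c] = v : in range wherever the ports write under Pre_
def setCell (g : List (List String)) (r c : Nat) (v : String) : List (List String) :=
  g.modify r (fun row => row.set c v)

def stepA (s : List (List String) × Bool × Nat × Nat) (p : Nat × Nat) :
    List (List String) × Bool × Nat × Nat :=
  let (g, added, pr, pc) := s
  if getCell g p.1 p.2 == " " then
    if !added then (setCell g pr pc "-", true, pr, pc) else (g, added, pr, pc)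
  else (g, added, p.1, p.2)

def backtonotstar (starmap : List (List String)) : List (List String) :=
  let n := starmap.length
  ((List.range n).foldl
      (fun s row => (List.range n).foldl (fun s col => stepA s (row, col)) s)
      (starmap, false, 0, 0)).1

-- ===== PORT B =====
def backtonotstar_alt (starmap : List (List String)) : List (List String) :=
  let n := starmap.length
  match ((List.range n).flatMap (fun r => (List.range n).map (fun c => (r, c)))).find?
      (fun p => getCell starmap p.1 p.2 == " ") with
  | none => starmap
  | some p =>
    let k := p.1 * n + p.2
    let j := if k > 0 then k - 1 else 0
    setCell starmap (j / n) (j % n) "-"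

-- ===== PRECONDITION & SPEC =====
-- Pre_ excludes exactly the ragged grids with a row shorter than len(starmap), on which Python A
-- raises IndexError while scanning its square range.
def Pre_backtonotstar (starmap : List (List String)) : Prop :=
  ∀ row ∈ starmap, starmap.length ≤ row.length
instance (starmap : List (List String)) : Decidable (Pre_backtonotstar starmap) := by
  unfold Pre_backtonotstar; infer_instance
def pvWitness_backtonotstar : List (List String) := [["*", " "], ["*", "*"]]

def Spec_backtonotstar (starmap : List (List String)) (out : List (List String)) : Prop := out = backtonotstar_alt starmap
instance (starmap : List (List String)) (out : List (List String)) : Decidable (Spec_backtonotstar starmap out) := by unfold Spec_backtonotstar; infer_instance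

-- ===== CLAIM (what is proved, stated in full; the proofs are below) =====
def Claim_equal_backtonotstar : Prop := ∀ (starmap : List (List String)), Dom_backtonotstar starmap → Pre_backtonotstar starmap → Spec_backtonotstar starmap (backtonotstar starmap)

-- ===== LEMMAS AND PROOFS =====

-- the predicate "this cell of g is a blank"
def spBlank (g : List (List String)) (p : Nat × Nat) : Bool := getCell g p.1 p.2 == " "

-- the cell A marks: the one just before the first blank of ps, defaulting to prev
def prevMark (g : List (List String)) : List (Nat × Nat) → Nat × Nat → Option (Nat × Nat)
  | [], _ => none
  | p :: ps, prev => if spBlank g p then some prev else prevMark g ps p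

theorem nested_eq_flat (rows cols : List Nat) (init : List (List String) × Bool × Nat × Nat) :
    rows.foldl (fun s row => cols.foldl (fun s col => stepA s (row, col)) s) init
      = (rows.flatMap (fun r => cols.map (fun c => (r, c)))).foldl stepA init := by
  induction rows generalizing init with
  | nil => rfl
  | cons r rs ih => simp [List.foldl_append, List.foldl_map, ih]

theorem foldl_stepA_true (ps : List (Nat × Nat)) :
    ∀ (g : List (List String)) (pr pc : Nat),
      (ps.foldl stepA (g, true, pr, pc)).1 = g := by
  induction ps with
  | nil => intro g pr pc; rfl
  | cons p ps ih =>
    intro g pr pc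
    simp only [List.foldl_cons, stepA]
    split <;> exact ih g _ _

theorem foldl_stepA_false (ps : List (Nat × Nat)) :
    ∀ (g : List (List String)) (pr pc : Nat),
      (ps.foldl stepA (g, false, pr, pc)).1
        = (prevMark g ps (pr, pc)).elim g (fun q => setCell g q.1 q.2 "-") := by
  induction ps with
  | nil => intro g pr pc; rfl
  | cons p ps ih =>
    intro g pr pc
    simp only [List.foldl_cons, stepA, prevMark, spBlank]
    by_cases h : getCell g p.1 p.2 == " "
    · simp only [h, if_true, Bool.not_false, Option.elim_some]
      simpa using foldl_stepA_true ps (setCell g pr pc "-") pr pc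
    · simp only [h, Bool.false_eq_true, if_false]
      exact ih g p.1 p.2

theorem prevMark_spec (g : List (List String)) (ps : List (Nat × Nat)) :
    ∀ prev : Nat × Nat,
      prevMark g ps prev
        = (ps.findIdx? (spBlank g)).map
            (fun i => if i = 0 then prev else ps.getD (i - 1) (0, 0)) := by
  induction ps with
  | nil => intro prev; rfl
  | cons p ps ih =>
    intro prev
    simp only [prevMark, List.findIdx?_cons]
    by_cases h : spBlank g p
    · simp [h]
    · simp only [h, Bool.false_eq_true, if_false]
      rw [ih p]
      cases hf : ps.findIdx? (spBlank g) with
      | none => simp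
      | some i => cases i <;> simp [List.getD]

theorem find?_eq_findIdx? {α : Type} (p : α → Bool) (l : List α) :
    l.find? p = (l.findIdx? p).bind (fun i => l[i]?) := by
  induction l with
  | nil => rfl
  | cons a l ih =>
    simp only [List.find?_cons, List.findIdx?_cons]
    by_cases h : p a
    · simp [h]
    · simp only [h, if_false, Bool.false_eq_true]
      rw [ih]
      cases hf : l.findIdx? p with
      | none => simp
      | some i => simp [Option.bind]

theorem findIdx?_lt_length {α : Type} {p : α → Bool} {l : List α} {i : Nat}
    (h : l.findIdx? p = some i) : i < l.length := by
  induction l generalizing i with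
  | nil => simp at h
  | cons a l ih =>
    rw [List.findIdx?_cons] at h
    by_cases hp : p a
    · simp [hp] at h; simp only [List.length_cons]; omega
    · simp only [hp, if_false, Bool.false_eq_true] at h
      cases hf : l.findIdx? p with
      | none => rw [hf] at h; simp at h
      | some j =>
        rw [hf] at h
        simp at h
        have := ih hf
        simp only [List.length_cons]
        omega

theorem pairs_eq (n : Nat) : ∀ m : Nat,
    (List.range m).flatMap (fun r => (List.range n).map (fun c => (r, c)))
      = (List.range (m * n)).map (fun i => (i / n, i % n)) := by
  intro m
  induction m with
  | zero => simp
  | succ m ih =>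
    rcases Nat.eq_zero_or_pos n with hn | hn
    · subst hn; simp
    · rw [List.range_succ, List.flatMap_append, ih]
      have : (m + 1) * n = m * n + n := by ring
      rw [this, List.range_add, List.map_append, List.map_map]
      congr 1
      · simp only [List.flatMap_cons, List.flatMap_nil, List.append_nil]
        apply List.map_congr_left
        intro c hc
        have hc' : c < n := List.mem_range.mp hc
        have hdiv : (m * n + c) / n = m := by
          rw [Nat.add_comm, Nat.add_mul_div_right _ _ hn, Nat.div_eq_of_lt hc']
          omega
        have hmod : (m * n + c) % n = c := by
          rw [Nat.add_comm, Nat.add_mul_mod_self_right, Nat.mod_eq_of_lt hc']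
        simp only [Function.comp_apply, Prod.mk.injEq]
        exact ⟨hdiv.symm, hmod.symm⟩

theorem div_mul_add_mod (i n : Nat) : i / n * n + i % n = i := by
  rw [Nat.mul_comm]
  exact Nat.div_add_mod i n

-- ===== VERDICT (by name: the statement is the Claim_ definition above) =====
theorem backtonotstar_spec : Claim_equal_backtonotstar := by
  intro g _dom _pre
  unfold Spec_backtonotstar backtonotstar backtonotstar_alt
  simp only []
  rw [nested_eq_flat, pairs_eq, foldl_stepA_false, prevMark_spec, find?_eq_findIdx?]
  set n := g.length with hn
  have hsp : (fun p : Nat × Nat => getCell g p.1 p.2 == " ") = spBlank g := rfl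
  rw [hsp]
  have hps : ∀ i : Nat, i < n * n →
      ((List.range (n * n)).map (fun i => (i / n, i % n)))[i]? = some (i / n, i % n) := by
    intro i hi
    rw [List.getElem?_map, List.getElem?_range hi]
    rfl
  cases hf : ((List.range (n * n)).map (fun i => (i / n, i % n))).findIdx? (spBlank g) with
  | none => rfl
  | some i =>
    have hi : i < n * n := by
      have := findIdx?_lt_length hf
      simpa using this
    simp only [Option.map_some, Option.elim_some, Option.bind_some, hps i hi]
    cases i with
    | zero =>
      simp
    | succ i' =>
      have hi' : i' < n * n := by omega
      have hgetD : ((List.range (n * n)).map (fun i => (i / n, i % n))).getD i' (0, 0)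
          = (i' / n, i' % n) := by
        rw [List.getD, hps i' hi']; rfl
      have hk : (i' + 1) / n * n + (i' + 1) % n = i' + 1 := div_mul_add_mod _ _
      simp only [Nat.succ_ne_zero, if_false, Nat.add_sub_cancel, hgetD, hk]
      simp
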